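-- pv_equiv track=rewrite | github.com/imadnyc/edea-ms | app/test/test_measurement_flow.py | flexible_test_condition_generator
-- ===== SOURCE A (Python) =====
-- import itertools
-- from typing import Any
--
-- def flexible_test_condition_generator(
--     test_parameters: dict[str, list[Any]]
-- ) -> list[dict[str, Any]]:
--     """
--     General-purpose test condition generator.
--     """
--
--     test_conditions = []
--     for idx, e in enumerate(itertools.product(*test_parameters.values())):
--         d = {"idx": idx}
--         for subindex, key in enumerate(test_parameters.keys()):
--             d[key] = e[subindex]
--         test_conditions.append(d)
--     return test_conditions
-- ===== SOURCE B (Python) =====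
-- def flexible_test_condition_generator(
--     test_parameters: dict[str, list]
-- ) -> list[dict]:
--     """Build the Cartesian product incrementally by folding over the
--     parameters (first key varies slowest), then prepend the index."""
--     result = [{}]
--     for key, values in test_parameters.items():
--         result = [{**d, key: v} for d in result for v in values]
--     return [{"idx": i, **d} for i, d in enumerate(result)]
-- ===== Notes on version B (the rewrite author's own statement) =====
-- stated objective: alternative
-- what changed: Replaces itertools.product plus an indexed inner key loop by an incremental fold that cross-multiplies a list of partial dicts one parameter at a time, then prepends the index with a dict-merge comprehension.
import Mathlib
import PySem

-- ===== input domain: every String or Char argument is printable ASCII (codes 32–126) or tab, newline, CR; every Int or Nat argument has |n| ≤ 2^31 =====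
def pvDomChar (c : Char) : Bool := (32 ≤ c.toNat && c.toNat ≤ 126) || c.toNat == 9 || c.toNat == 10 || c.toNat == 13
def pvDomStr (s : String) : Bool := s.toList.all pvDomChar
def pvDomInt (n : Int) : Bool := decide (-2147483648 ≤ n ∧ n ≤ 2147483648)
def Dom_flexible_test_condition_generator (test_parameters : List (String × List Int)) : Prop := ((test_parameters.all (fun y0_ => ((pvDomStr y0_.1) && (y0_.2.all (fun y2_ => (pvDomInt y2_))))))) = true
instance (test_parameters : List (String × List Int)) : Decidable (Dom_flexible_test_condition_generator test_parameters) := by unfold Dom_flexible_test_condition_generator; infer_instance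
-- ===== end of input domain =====

-- B builds the Cartesian product incrementally by a fold over the parameters instead of
-- itertools.product with an indexed inner key loop; alternative decomposition, same cost.

-- ===== PORT A =====
-- itertools.product(*lists), first argument varying slowest (exact for finite lists)
def pyProduct : List (List Int) → List (List Int)
  | [] => [[]]
  | l :: rest => l.flatMap (fun x => (pyProduct rest).map (fun e => x :: e))

def flexible_test_condition_generator (test_parameters : List (String × List Int)) : List (List (String × Int)) :=
  (PySem.List.enumerate (pyProduct (test_parameters.map (·.2))) 0).foldl
    (fun acc p =>
      -- d = {"idx": idx}; for subindex, key in enumerate(keys): d[key] = e[subindex]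
      -- e[subindex] is always in range (product tuples have one entry per key), so pyGetD is exact
      let d : PySem.Dict String Int :=
        (PySem.List.enumerate (test_parameters.map (·.1)) 0).foldl
          (fun d q => d.insert q.2 (PySem.List.pyGetD p.2 q.1 0))
          (PySem.Dict.empty.insert "idx" p.1)
      acc ++ [d.items]) []

-- ===== PORT B =====
def flexible_test_condition_generator_alt (test_parameters : List (String × List Int)) : List (List (String × Int)) :=
  let result : List (PySem.Dict String Int) :=
    test_parameters.foldl
      (fun res kv => res.flatMap (fun d => kv.2.map (fun v => d.insert kv.1 v)))
      [PySem.Dict.empty]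
  (PySem.List.enumerate result 0).map (fun p =>
    -- {"idx": i, **d}
    (p.2.items.foldl (fun d q => d.insert q.1 q.2) (PySem.Dict.empty.insert "idx" p.1)).items)

-- ===== PRECONDITION & SPEC =====
-- Pre_ requires the keys to be pairwise distinct: the Python argument is a dict, which can
-- never contain duplicate keys, so duplicate-key association lists represent no Python input.
def Pre_flexible_test_condition_generator (test_parameters : List (String × List Int)) : Prop :=
  (test_parameters.map (·.1)).Nodup
instance (test_parameters : List (String × List Int)) : Decidable (Pre_flexible_test_condition_generator test_parameters) := by unfold Pre_flexible_test_condition_generator; infer_instance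

def pvWitness_flexible_test_condition_generator : (List (String × List Int)) :=
  [("a", [1, 2]), ("b", [3])]

def Spec_flexible_test_condition_generator (test_parameters : List (String × List Int)) (out : List (List (String × Int))) : Prop := out = flexible_test_condition_generator_alt test_parameters
instance (test_parameters : List (String × List Int)) (out : List (List (String × Int))) : Decidable (Spec_flexible_test_condition_generator test_parameters out) := by unfold Spec_flexible_test_condition_generator; infer_instance

-- ===== CLAIM (what is proved, stated in full; the proofs are below) =====
def Claim_equal_flexible_test_condition_generator : Prop := ∀ (test_parameters : List (String × List Int)), Dom_flexible_test_condition_generator test_parameters → Pre_flexible_test_condition_generator test_parameters → Spec_flexible_test_condition_generator test_parameters (flexible_test_condition_generator test_parameters)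

-- ===== LEMMAS AND PROOFS =====

def insertAll (d : PySem.Dict String Int) (ps : List (String × Int)) : PySem.Dict String Int :=
  ps.foldl (fun d p => d.insert p.1 p.2) d

theorem length_mem_pyProduct : ∀ (ls : List (List Int)) (e : List Int),
    e ∈ pyProduct ls → e.length = ls.length := by
  intro ls
  induction ls with
  | nil => intro e he; simp [pyProduct] at he; simp [he]
  | cons l rest ih =>
    intro e he
    simp only [pyProduct, List.mem_flatMap, List.mem_map] at he
    obtain ⟨x, _, e', he', rfl⟩ := he
    simp [ih e' he']

theorem enumerate_map {α β : Type} (g : α → β) :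
    ∀ (xs : List α) (s : Int),
    PySem.List.enumerate (xs.map g) s
      = (PySem.List.enumerate xs s).map (fun p => (p.1, g p.2)) := by
  intro xs
  induction xs with
  | nil => intro s; simp
  | cons x xs ih => intro s; simp [PySem.List.enumerate_cons, ih]

theorem inner_eq : ∀ (keys : List String) (pre e : List Int) (d : PySem.Dict String Int),
    keys.length = e.length →
    (PySem.List.enumerate keys (pre.length : Int)).foldl
        (fun d q => d.insert q.2 (PySem.List.pyGetD (pre ++ e) q.1 0)) d
      = insertAll d (keys.zip e) := by
  intro keys
  induction keys with
  | nil => intro pre e d _; simp [insertAll]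
  | cons k ks ih =>
    intro pre e d hlen
    cases e with
    | nil => simp at hlen
    | cons v e' =>
      simp only [PySem.List.enumerate_cons, List.foldl_cons]
      have hget : PySem.List.pyGetD (pre ++ v :: e') (pre.length : Int) 0 = v := by
        have := PySem.List.pyGet?_append_length (pre := pre) (y := v) (ys := e')
        simp [PySem.List.pyGetD]
      rw [hget]
      have hlen' : ks.length = e'.length := by simpa using hlen
      have hcast : ((pre.length : Int) + 1) = (((pre ++ [v]).length : Nat) : Int) := by
        simp
      rw [hcast]
      have := ih (pre ++ [v]) e' (d.insert k v) hlen'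
      simp only [List.append_assoc, List.cons_append, List.nil_append] at this
      rw [this]
      simp [insertAll]

theorem bfold_eq : ∀ (tp : List (String × List Int)) (res : List (PySem.Dict String Int)),
    tp.foldl (fun res kv => res.flatMap (fun d => kv.2.map (fun v => d.insert kv.1 v))) res
      = res.flatMap (fun d =>
          (pyProduct (tp.map (·.2))).map (fun e => insertAll d ((tp.map (·.1)).zip e))) := by
  intro tp
  induction tp with
  | nil =>
    intro res
    simp [pyProduct, insertAll]
  | cons kv rest ih =>
    intro res
    simp only [List.foldl_cons]
    rw [ih]
    simp only [List.map_cons, pyProduct, List.flatMap_assoc, List.flatMap_map]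
    apply List.flatMap_congr
    intro d _
    simp only [insertAll, List.map_flatMap, List.map_map]
    apply List.flatMap_congr
    intro a _
    apply List.map_congr_left
    intro e _
    simp

theorem map_fst_zip_sublist : ∀ (keys : List String) (e : List Int),
    ((keys.zip e).map (·.1)).Sublist keys := by
  intro keys
  induction keys with
  | nil => intro e; simp
  | cons k ks ih =>
    intro e
    cases e with
    | nil => simp
    | cons v e' => simpa using (ih e').cons₂ k

theorem items_insertAll_empty (keys : List String) (e : List Int)
    (hnd : keys.Nodup) :
    (insertAll PySem.Dict.empty (keys.zip e)).items = keys.zip e := by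
  have hfresh : ∀ a ∈ keys.zip e, (PySem.Dict.empty : PySem.Dict String Int).contains a.1 = false := by
    intro a _; simp [PySem.Dict.contains_empty]
  have hnd' : ((keys.zip e).map (·.1)).Nodup :=
    hnd.sublist (map_fst_zip_sublist keys e)
  have := PySem.Dict.items_foldl_insert_fresh (l := keys.zip e)
    (k := fun a => a.1) (v := fun a => a.2) (d := PySem.Dict.empty)
    hfresh hnd'
  simpa [insertAll] using this

-- ===== VERDICT (by name: the statement is the Claim_ definition above) =====
theorem flexible_test_condition_generator_spec : Claim_equal_flexible_test_condition_generator := by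
  intro tp _ hpre
  unfold Spec_flexible_test_condition_generator
  unfold flexible_test_condition_generator flexible_test_condition_generator_alt
  rw [bfold_eq]
  simp only [List.flatMap_cons, List.flatMap_nil, List.append_nil]
  conv_rhs => rw [enumerate_map, List.map_map]
  rw [PySem.List.foldl_append_singleton_eq_map]
  simp only [List.nil_append]
  apply List.map_congr_left
  intro p hp
  rw [PySem.List.mem_enumerate_iff] at hp
  obtain ⟨k, hk, rfl⟩ := hp
  have hmem : (pyProduct (tp.map (·.2)))[k] ∈ pyProduct (tp.map (·.2)) := List.getElem_mem hk
  have hlen : (tp.map (·.1)).length = (pyProduct (tp.map (·.2)))[k].length := by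
    rw [length_mem_pyProduct _ _ hmem]; simp
  have hinner := inner_eq (tp.map (·.1)) [] ((pyProduct (tp.map (·.2)))[k])
      (PySem.Dict.empty.insert "idx" ((0:Int) + k)) hlen
  simp only [List.nil_append, List.length_nil, Nat.cast_zero] at hinner
  rw [hinner]
  simp only [Function.comp_apply]
  rw [items_insertAll_empty _ _ hpre]
  rfl
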